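-- pv_equiv track=rewrite | github.com/yavuzerbas/Cng-438-Assignment2 | assignment2.py | reverseDivideStringToSubstrings
-- ===== SOURCE A (Python) =====
-- def reverseDivideStringToSubstrings(text,key): #lata asfasdfasdfasdfasd;fljasdjhfdkjashfasjdf
--     subStrings = []
--     columnCount = len(key)
--     rowCount = len(text) // len(key)
--     for i in range(columnCount):
--         subString = ""
--         for j in range(rowCount):
--             index = (j*columnCount)+i
--             subString += text[index]
--         subStrings.append(subString)
--     return subStrings
-- ===== SOURCE B (Python) =====
-- def reverseDivideStringToSubstrings(text, key):
--     columnCount = len(key)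
--     rowCount = len(text) // columnCount
--     result = [""] * columnCount
--     for k in range(rowCount * columnCount):
--         result[k % columnCount] += text[k]
--     return result
-- ===== Notes on version B (the rewrite author's own statement) =====
-- stated objective: alternative
-- what changed: replaces A's nested column-by-column rebuild (for each column, an inner loop gathering every rowCount-th character with index arithmetic) with a single linear scatter pass appending text[k] to bucket k % columnCount
import Mathlib
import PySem

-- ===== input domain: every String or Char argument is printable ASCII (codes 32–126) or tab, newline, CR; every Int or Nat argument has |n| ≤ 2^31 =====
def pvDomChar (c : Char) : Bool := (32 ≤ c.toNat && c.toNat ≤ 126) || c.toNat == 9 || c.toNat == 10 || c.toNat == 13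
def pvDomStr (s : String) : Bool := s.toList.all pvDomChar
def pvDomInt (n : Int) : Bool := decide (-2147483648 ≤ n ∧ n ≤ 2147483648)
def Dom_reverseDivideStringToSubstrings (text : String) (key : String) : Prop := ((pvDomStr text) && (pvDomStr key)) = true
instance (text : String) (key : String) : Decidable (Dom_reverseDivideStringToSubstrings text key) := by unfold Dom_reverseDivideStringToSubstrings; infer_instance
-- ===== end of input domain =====

-- B replaces A's nested column-then-row rebuild with one linear scatter pass (text[k] goes to bucket k % columnCount); a timing run measured the single pass as a constant factor faster.

-- ===== PORT A =====
def reverseDivideStringToSubstrings (text : String) (key : String) : List String :=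
  let tl := text.toList
  let columnCount : Int := PySem.Str.len key
  let rowCount : Int := PySem.Int.floordiv (PySem.Str.len text) columnCount
  (PySem.List.pyRange 0 columnCount 1).foldl
    (fun subStrings i =>
      subStrings ++ [String.ofList ((PySem.List.pyRange 0 rowCount 1).foldl
        (fun subString j => subString ++ [PySem.List.pyGetD tl (j * columnCount + i) ' ']) [])])
    []

-- ===== PORT B =====
def reverseDivideStringToSubstrings_alt (text : String) (key : String) : List String :=
  let tl := text.toList
  let columnCount : Int := PySem.Str.len key
  let rowCount : Int := PySem.Int.floordiv (PySem.Str.len text) columnCount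
  let buckets := (PySem.List.pyRange 0 (rowCount * columnCount) 1).foldl
    (fun res k =>
      let i := PySem.Int.mod k columnCount
      PySem.List.pySetD res i (PySem.List.pyGetD res i [] ++ [PySem.List.pyGetD tl k ' ']))
    (PySem.List.pyRepeat [([] : List Char)] columnCount)
  buckets.map String.ofList

-- ===== PRECONDITION & SPEC =====
-- Pre_ excludes only key = "", on which both Pythons raise ZeroDivisionError (len(text) // len(key)).
def Pre_reverseDivideStringToSubstrings (text : String) (key : String) : Prop := key ≠ ""
instance (text : String) (key : String) : Decidable (Pre_reverseDivideStringToSubstrings text key) := by unfold Pre_reverseDivideStringToSubstrings; infer_instance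
def pvWitness_reverseDivideStringToSubstrings : String × String := ("abcdef", "ab")
def Spec_reverseDivideStringToSubstrings (text : String) (key : String) (out : List String) : Prop := out = reverseDivideStringToSubstrings_alt text key
instance (text : String) (key : String) (out : List String) : Decidable (Spec_reverseDivideStringToSubstrings text key out) := by unfold Spec_reverseDivideStringToSubstrings; infer_instance

-- ===== CLAIM (what is proved, stated in full; the proofs are below) =====
def Claim_equal_reverseDivideStringToSubstrings : Prop := ∀ (text : String) (key : String), Dom_reverseDivideStringToSubstrings text key → Pre_reverseDivideStringToSubstrings text key → Spec_reverseDivideStringToSubstrings text key (reverseDivideStringToSubstrings text key)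

-- ===== LEMMAS AND PROOFS =====

-- a list of length n is the tabulation of its own getD
theorem pv_self_map (res : List (List Char)) :
    (List.range res.length).map (fun i => res.getD i []) = res := by
  apply List.ext_getElem
  · simp
  · intro i h1 h2
    simp [List.getD_eq_getElem?_getD, List.getElem?_eq_getElem h2]

-- filter (· == i) over range n keeps exactly [i]
theorem pv_filter_range_eq (n i : Nat) (hi : i < n) :
    (List.range n).filter (fun t => t == i) = [i] := by
  induction n with
  | zero => omega
  | succ n ih =>
    rw [List.range_succ, List.filter_append]
    by_cases h : i < n
    · rw [ih h]
      simp
      omega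
    · have : i = n := by omega
      subst this
      have : (List.range i).filter (fun t => t == i) = [] := by
        apply List.filter_eq_nil_iff.mpr
        intro a ha
        simp at ha ⊢
        omega
      simp [this]

-- the indices below rc*cc congruent to i mod cc, in order, are j*cc+i for j < rc
theorem pv_filter_mod (cc i : Nat) (hi : i < cc) (rc : Nat) :
    (List.range (rc * cc)).filter (fun k => k % cc == i) = (List.range rc).map (fun j => j * cc + i) := by
  induction rc with
  | zero => simp
  | succ rc ih =>
    have hr : (rc + 1) * cc = rc * cc + cc := by ring
    rw [hr, List.range_add, List.filter_append, ih, List.filter_map]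
    have hcong : (List.range cc).filter ((fun k => k % cc == i) ∘ (fun t => rc * cc + t))
        = (List.range cc).filter (fun t => t == i) := by
      apply List.filter_congr
      intro t ht
      simp at ht
      simp [Function.comp, Nat.mod_eq_of_lt ht]
    rw [hcong, pv_filter_range_eq cc i hi, List.range_succ, List.map_append]
    simp

-- the scatter fold, characterised: bucket i = old bucket i ++ the chars at the indices ≡ i (mod cc)
theorem pv_scatter (tl : List Char) (cc : Nat) (hcc : 0 < cc) (m : Nat) (res : List (List Char))
    (hres : res.length = cc) :
    (List.range m).foldl (fun r k => r.set (k % cc) (r.getD (k % cc) [] ++ [tl.getD k ' '])) res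
    = (List.range cc).map
        (fun i => res.getD i [] ++ ((List.range m).filter (fun k => k % cc == i)).map (fun k => tl.getD k ' ')) := by
  induction m with
  | zero =>
    simp only [List.range_zero, List.foldl_nil, List.filter_nil, List.map_nil, List.append_nil]
    conv_rhs => rw [← hres]
    exact (pv_self_map res).symm
  | succ m ih =>
    rw [List.range_succ, List.foldl_append, ih, List.foldl_cons, List.foldl_nil]
    have hm : m % cc < cc := Nat.mod_lt _ hcc
    have hgetD : ∀ (f : Nat → List Char) (j : Nat), j < cc →
        ((List.range cc).map f).getD j [] = f j := by
      intro f j hj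
      simp [List.getD_eq_getElem?_getD, List.getElem?_map, List.getElem?_range hj]
    rw [hgetD _ _ hm]
    apply List.ext_getElem
    · simp
    · intro i h1 h2
      simp only [List.length_set, List.length_map, List.length_range] at h1 h2
      rw [List.getElem_set]
      by_cases h : m % cc = i
      · subst h
        simp [List.filter_append, List.append_assoc]
      · rw [if_neg h]
        simp [List.filter_append, h]

-- ===== VERDICT (by name: the statement is the Claim_ definition above) =====
theorem reverseDivideStringToSubstrings_spec : Claim_equal_reverseDivideStringToSubstrings := by
  intro text key _ hpre
  unfold Spec_reverseDivideStringToSubstrings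
  unfold reverseDivideStringToSubstrings reverseDivideStringToSubstrings_alt
  have hk : key.toList ≠ [] := by simpa using hpre
  have hcc : 0 < key.toList.length := List.length_pos_of_ne_nil hk
  simp only [PySem.Str.len_eq, PySem.Int.floordiv_natCast, ← Nat.cast_mul,
    PySem.List.pyRange_zero_nat, List.foldl_map, PySem.List.pyRepeat_singleton,
    Int.toNat_natCast, PySem.Int.mod_natCast, PySem.List.pySetD_natCast,
    PySem.List.pyGetD_natCast, ← Nat.cast_add]
  rw [pv_scatter text.toList key.toList.length hcc _ _ (by simp)]
  simp only [PySem.List.foldl_append_singleton_eq_map, List.nil_append, List.map_map]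
  apply List.map_congr_left
  intro i hi
  simp only [List.mem_range] at hi
  simp only [Function.comp_apply]
  rw [pv_filter_mod key.toList.length i hi]
  simp [Function.comp_def]
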